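-- pv_equiv track=rewrite | github.com/ctk-hq/ctk | services/backend/src/manifest_generation.py | _sequence_indent_one
-- ===== SOURCE A (Python) =====
-- def _sequence_indent_one(text: str) -> str:
--     result = ""
--     first_indent = True
--
--     for line in text.splitlines(True):
--         stripped = line.lstrip()
--         indent = len(line) - len(stripped)
--
--         if indent == 0 and not first_indent:
--             result += "\n"
--
--         result += line
--
--         if indent == 0 and first_indent:
--             first_indent = False
--
--     return result
-- ===== SOURCE B (Python) =====
-- def _sequence_indent_one(text: str) -> str:
--     lines = text.splitlines(True)
--     tops = [len(line) == len(line.lstrip()) for line in lines]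
--     try:
--         k = tops.index(True)
--     except ValueError:
--         return "".join(lines)
--     return "".join(lines[: k + 1]) + "".join(
--         ("\n" + line) if top else line
--         for line, top in zip(lines[k + 1 :], tops[k + 1 :])
--     )
-- ===== Notes on version B (the rewrite author's own statement) =====
-- stated objective: alternative
-- what changed: B replaces A's single stateful pass (first_indent flag, += accumulation with inline blank-line emission) by a staged computation: it finds the index of the first top-level line with list.index, copies the slice up to and including it verbatim, and joins the remaining lines mapped through a prepend-newline-if-top-level function.
import Mathlib
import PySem

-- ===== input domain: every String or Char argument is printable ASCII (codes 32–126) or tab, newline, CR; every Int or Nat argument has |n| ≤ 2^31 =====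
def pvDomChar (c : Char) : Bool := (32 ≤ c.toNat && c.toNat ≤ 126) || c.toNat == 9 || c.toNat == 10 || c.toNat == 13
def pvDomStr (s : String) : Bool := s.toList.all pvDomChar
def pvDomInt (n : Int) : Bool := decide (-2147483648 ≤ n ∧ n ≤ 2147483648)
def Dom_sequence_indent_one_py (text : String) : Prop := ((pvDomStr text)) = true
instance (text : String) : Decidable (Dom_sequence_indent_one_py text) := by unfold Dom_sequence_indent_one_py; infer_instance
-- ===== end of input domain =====

-- B locates the first top-level line by index search, copies the prefix verbatim and maps a
-- prepend-newline-if-top-level function over the suffix, instead of A's single stateful pass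
-- with a first_indent flag and += accumulation; same return value (objective: alternative).

-- shared helper: text.splitlines(True) (keepends) on the ASCII domain, where the
-- line boundaries are exactly '\n', '\r' and '\r\n'; exact there.
def pvSplitlinesKeep (cur : List Char) : List Char → List (List Char)
  | [] => if cur = [] then [] else [cur]
  | '\n' :: rest => (cur ++ ['\n']) :: pvSplitlinesKeep [] rest
  | '\r' :: '\n' :: rest => (cur ++ ['\r', '\n']) :: pvSplitlinesKeep [] rest
  | '\r' :: rest => (cur ++ ['\r']) :: pvSplitlinesKeep [] rest
  | c :: rest => pvSplitlinesKeep (cur ++ [c]) rest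

-- ===== PORT A =====
-- A's test 'len(line) - len(line.lstrip()) == 0'
def pvIndent0 (line : List Char) : Bool :=
  decide (line.length - (PySem.Chars.lstrip line).length = 0)

def pvSeqA_go : List (List Char) → List Char → Bool → List Char
  | [], result, _ => result
  | line :: rest, result, first_indent =>
    let i0 := pvIndent0 line
    let result := if i0 && !first_indent then result ++ ['\n'] else result
    let result := result ++ line
    let first_indent := if i0 && first_indent then false else first_indent
    pvSeqA_go rest result first_indent

def sequence_indent_one_py (text : String) : String :=
  String.ofList (pvSeqA_go (pvSplitlinesKeep [] text.toList) [] true)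

-- ===== PORT B =====
-- B's test 'len(line) == len(line.lstrip())'
def pvTop (line : List Char) : Bool :=
  decide (line.length = (PySem.Chars.lstrip line).length)

def sequence_indent_one_py_alt (text : String) : String :=
  let lines := pvSplitlinesKeep [] text.toList
  let tops := lines.map pvTop
  match PySem.List.index? tops true with
  | none => String.ofList (PySem.Chars.join [] lines)
  | some k =>
      String.ofList (PySem.Chars.join [] (lines.take (k + 1)) ++
        PySem.Chars.join []
          (((lines.drop (k + 1)).zip (tops.drop (k + 1))).map
            (fun p => if p.2 then '\n' :: p.1 else p.1)))

-- ===== PRECONDITION & SPEC =====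
def Spec_sequence_indent_one_py (text : String) (out : String) : Prop := out = sequence_indent_one_py_alt text
instance (text : String) (out : String) : Decidable (Spec_sequence_indent_one_py text out) := by unfold Spec_sequence_indent_one_py; infer_instance

-- ===== CLAIM (what is proved, stated in full; the proofs are below) =====
def Claim_equal_sequence_indent_one_py : Prop := ∀ (text : String), Dom_sequence_indent_one_py text → Spec_sequence_indent_one_py text (sequence_indent_one_py text)

-- ===== LEMMAS AND PROOFS =====

-- the two indent tests agree (lstrip never lengthens the line)
theorem pv_top_eq_indent0 (l : List Char) : pvTop l = pvIndent0 l := by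
  have h : (PySem.Chars.lstrip l).length ≤ l.length := by
    simp only [PySem.Chars.lstrip]
    exact List.length_dropWhile_le PySem.Chars.isspace l
  simp only [pvTop, pvIndent0]
  by_cases he : l.length = (PySem.Chars.lstrip l).length <;> simp [he]
  omega

-- ''.join with empty separator is flatten
theorem pv_join0 (parts : List (List Char)) :
    PySem.Chars.join [] parts = parts.flatten := by
  induction parts with
  | nil => simp [PySem.Chars.join_nil]
  | cons a m ih =>
      cases m with
      | nil => simp [PySem.Chars.join_singleton]
      | cons b t => rw [PySem.Chars.join_cons_cons, ih]; simp

-- A skips over a run of indented lines, copying them verbatim, while first_indent stays true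
theorem pv_goA_pre (pre rest : List (List Char)) (res : List Char)
    (h : ∀ l ∈ pre, pvIndent0 l = false) :
    pvSeqA_go (pre ++ rest) res true = pvSeqA_go rest (res ++ pre.flatten) true := by
  induction pre generalizing res with
  | nil => simp
  | cons a m ih =>
      have ha : pvIndent0 a = false := h a (by simp)
      simp only [List.cons_append, pvSeqA_go, ha, Bool.false_and, Bool.and_true,
        Bool.false_eq_true, if_false]
      rw [ih (res ++ a) (fun l hl => h l (List.mem_cons_of_mem _ hl))]
      simp

-- once first_indent is false, A maps 'prepend \n if top-level' over the remaining lines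
theorem pv_goA_post (rest : List (List Char)) (res : List Char) :
    pvSeqA_go rest res false
      = res ++ (rest.map (fun l => if pvIndent0 l then '\n' :: l else l)).flatten := by
  induction rest generalizing res with
  | nil => simp [pvSeqA_go]
  | cons a m ih =>
      simp only [pvSeqA_go, Bool.not_false, Bool.and_true, Bool.and_false,
        Bool.false_eq_true, ite_self]
      rw [ih]
      cases h : pvIndent0 a <;> simp [h]

-- ===== VERDICT (by name: the statement is the Claim_ definition above) =====
theorem sequence_indent_one_py_spec : Claim_equal_sequence_indent_one_py := by
  intro text _
  unfold Spec_sequence_indent_one_py sequence_indent_one_py sequence_indent_one_py_alt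
  set lines := pvSplitlinesKeep [] text.toList with hlines
  simp only
  cases hidx : PySem.List.index? (lines.map pvTop) true with
  | none =>
      have hall : ∀ l ∈ lines, pvIndent0 l = false := by
        intro l hl
        rw [← pv_top_eq_indent0]
        have := (PySem.List.index?_eq_none_iff _ _).1 hidx
        by_contra hc
        exact this (List.mem_map.2 ⟨l, hl, by simpa using hc⟩)
      rw [pv_join0]
      have := pv_goA_pre lines [] [] hall
      simp only [List.append_nil, List.nil_append] at this
      rw [this]
      rfl
  | some k =>
      obtain ⟨pre, suf, hsplit, hlen, hnmem⟩ :=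
        (PySem.List.index?_eq_some_iff _ _ _).1 hidx
      obtain ⟨lpre, rest, hl1, hpre, hrest⟩ := List.map_eq_append_iff.1 hsplit
      obtain ⟨l0, lsuf, hl2, hl0, hsuf⟩ := List.map_eq_cons_iff.1 hrest
      have hlpre_len : lpre.length = k := by
        rw [← hlen, ← hpre, List.length_map]
      have hlpre_false : ∀ l ∈ lpre, pvIndent0 l = false := by
        intro l hl
        rw [← pv_top_eq_indent0]
        by_contra hc
        exact hnmem (hpre ▸ List.mem_map.2 ⟨l, hl, by simpa using hc⟩)
      have hl0top : pvIndent0 l0 = true := by rw [← pv_top_eq_indent0, hl0]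
      have hlines_eq : lines = lpre ++ l0 :: lsuf := by rw [hl1, hl2]
      -- evaluate A
      rw [hlines_eq, pv_goA_pre lpre (l0 :: lsuf) [] hlpre_false]
      simp only [pvSeqA_go, hl0top, Bool.not_true, Bool.and_false, Bool.and_true,
        if_true, List.nil_append]
      rw [pv_goA_post]
      -- evaluate B
      have htake : (lpre ++ l0 :: lsuf).take (k + 1) = lpre ++ [l0] := by
        rw [← hlpre_len, List.take_length_add_append]; rfl
      have hdrop : (lpre ++ l0 :: lsuf).drop (k + 1) = lsuf := by
        rw [← hlpre_len, List.drop_length_add_append]; rfl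
      have hdropt : ((lpre ++ l0 :: lsuf).map pvTop).drop (k + 1) = lsuf.map pvTop := by
        rw [← List.map_drop, hdrop]
      rw [htake, hdrop, hdropt, pv_join0, pv_join0]
      rw [← List.map_prod_left_eq_zip, List.map_map]
      simp only [Function.comp_def, pv_top_eq_indent0]
      simp
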